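-- pv_equiv track=rewrite | github.com/w2naf/eclipse_calculator | eclipse_calc/locator.py | __grid_valid
-- ===== SOURCE A (Python) =====
-- def inx_alpha(inx):
--     """
--     Determine if a string position should be alpha in
--     a grid square.
--     """
--
--     # Check if the position is odd and decrement if necessary.
--     if (inx % 2): inx -= 1
--
--     # Determine if the position should be an alpha char.
--     alpha   = not bool((inx/2) % 2)
--     return alpha
--
-- def __grid_valid(grid):
--     """
--     Determine if a gridsquare is valid.
--     """
--     try:
--         gs_len      = len(grid)
--     except:
--         return False
--
--     # Test length not zero...
--     if gs_len == 0:
--         return False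
--
--     # Make sure an even number
--     if gs_len % 2:
--         return False
--
--     # Check that alphas and numerics are in the right places.
--     for inx,char in enumerate(grid):
--         should_be_alpha = inx_alpha(inx)
--         valid   = not should_be_alpha ^ char.isalpha()
--         if not valid:
--             return False
--
--     # If you pass all of the tests, return True!
--     return True
-- ===== SOURCE B (Python) =====
-- def __grid_valid(grid):
--     # Chunked validation: consume the gridsquare in blocks of 4
--     # (two letters then two non-letters), instead of a per-index
--     # closed-form check.
--     try:
--         n = len(grid)
--     except:
--         return False
--     if n == 0 or n % 2:
--         return False
--     return _chunks_ok(list(grid))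
--
-- def _chunks_ok(chars):
--     if not chars:
--         return True
--     head = chars[:2]
--     tail = chars[2:4]
--     if not all(c.isalpha() for c in head):
--         return False
--     if any(c.isalpha() for c in tail):
--         return False
--     return _chunks_ok(chars[4:])
-- ===== Notes on version B (the rewrite author's own statement) =====
-- stated objective: alternative
-- what changed: Replaces A's per-index loop driven by the inx_alpha parity/division closed form with a chunked recursion that consumes the string four characters at a time, requiring the first two to be letters and the next two not.
import Mathlib
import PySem

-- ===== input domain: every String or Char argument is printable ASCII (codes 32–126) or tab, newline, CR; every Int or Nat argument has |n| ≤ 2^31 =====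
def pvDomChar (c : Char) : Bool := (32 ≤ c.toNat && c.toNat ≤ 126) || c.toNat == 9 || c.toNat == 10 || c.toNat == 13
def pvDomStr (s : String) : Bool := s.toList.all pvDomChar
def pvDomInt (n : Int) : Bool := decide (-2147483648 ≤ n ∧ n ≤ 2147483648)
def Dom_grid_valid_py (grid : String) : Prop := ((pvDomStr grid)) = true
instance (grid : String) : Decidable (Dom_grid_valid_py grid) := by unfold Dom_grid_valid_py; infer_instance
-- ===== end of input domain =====

-- B validates the string in blocks of four (two letters, two non-letters) instead of
-- A's per-index closed-form position test; objective: simpler decomposition, same cost.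

-- ===== PORT A =====
-- inx_alpha: 'inx/2' is Python true division, but inx is even at that point, so it is
-- exact and '(inx/2) % 2' equals integer floor division followed by mod; ported as such.
def inx_alpha (inx : Int) : Bool :=
  let inx := if inx % 2 ≠ 0 then inx - 1 else inx
  !(PySem.Int.mod (PySem.Int.floordiv inx 2) 2 ≠ 0)

-- the 'for inx,char in enumerate(grid)' loop with early return, index carried explicitly
def gridLoopA (inx : Nat) : List Char → Bool
  | [] => true
  | c :: rest =>
    let should_be_alpha := inx_alpha (inx : Int)
    let valid := !(should_be_alpha.xor (PySem.Chars.isalpha c))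
    if !valid then false else gridLoopA (inx + 1) rest

-- 'len(grid)' never raises for a string, so the try/except is vacuous here
def grid_valid_py (grid : String) : Bool :=
  let gs_len := PySem.Str.len grid
  if gs_len == 0 then false
  else if gs_len % 2 ≠ 0 then false
  else gridLoopA 0 grid.toList

-- ===== PORT B =====
-- _chunks_ok: chars[:2] all alpha, chars[2:4] none alpha, recurse on chars[4:]
def chunksOk : List Char → Bool
  | [] => true
  | c :: rest =>
    let head := PySem.List.slice (c :: rest) none (some 2)
    let tail := PySem.List.slice (c :: rest) (some 2) (some 4)
    if !(head.all PySem.Chars.isalpha) then false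
    else if tail.any PySem.Chars.isalpha then false
    else chunksOk (PySem.List.slice (c :: rest) (some 4) none)
termination_by xs => xs.length
decreasing_by
  rw [show ((4 : Int)) = ((4 : Nat) : Int) from rfl, PySem.List.slice_from_natCast]
  simp [List.length_drop]

def grid_valid_py_alt (grid : String) : Bool :=
  let n := PySem.Str.len grid
  if n == 0 || n % 2 ≠ 0 then false
  else chunksOk grid.toList

-- ===== PRECONDITION & SPEC =====
def Spec_grid_valid_py (grid : String) (out : Bool) : Prop := out = grid_valid_py_alt grid
instance (grid : String) (out : Bool) : Decidable (Spec_grid_valid_py grid out) := by unfold Spec_grid_valid_py; infer_instance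

-- ===== CLAIM (what is proved, stated in full; the proofs are below) =====
def Claim_equal_grid_valid_py : Prop := ∀ (grid : String), Dom_grid_valid_py grid → Spec_grid_valid_py grid (grid_valid_py grid)

-- ===== LEMMAS AND PROOFS =====

-- A's position predicate in closed form: index i should be alpha iff i % 4 < 2
theorem inx_alpha_eq (k : Nat) : inx_alpha (k : Int) = decide (k % 4 < 2) := by
  unfold inx_alpha
  dsimp only
  rw [PySem.Int.floordiv_eq_ediv_of_pos (by norm_num : (0:Int) < 2),
      PySem.Int.mod_eq_emod_of_pos (by norm_num : (0:Int) < 2),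
      ← decide_not, decide_eq_decide]
  split_ifs <;> omega

-- unfold one step of chunksOk, with the slices rewritten to take/drop
theorem chunksOk_cons (c : Char) (rest : List Char) :
    chunksOk (c :: rest) =
      (((c :: rest).take 2).all PySem.Chars.isalpha &&
        !(((c :: rest).drop 2).take 2).any PySem.Chars.isalpha &&
        chunksOk ((c :: rest).drop 4)) := by
  rw [chunksOk]
  rw [show ((2 : Int)) = ((2 : Nat) : Int) from rfl, show ((4 : Int)) = ((4 : Nat) : Int) from rfl]
  rw [PySem.List.slice_to_natCast, PySem.List.slice_natCast, PySem.List.slice_from_natCast]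
  cases h1 : ((c :: rest).take 2).all PySem.Chars.isalpha <;>
    cases h2 : (((c :: rest).drop 2).take ((4:Nat) - 2)).any PySem.Chars.isalpha <;>
      simp

theorem gridLoopA_eq_chunksOk (k : Nat) (xs : List Char) (hk : k % 4 = 0) :
    gridLoopA k xs = chunksOk xs := by
  match xs with
  | [] => rw [chunksOk]; rfl
  | [a] =>
    rw [chunksOk_cons]
    simp only [gridLoopA, inx_alpha_eq]
    simp [hk, chunksOk]
  | [a, b] =>
    rw [chunksOk_cons]
    simp only [gridLoopA, inx_alpha_eq]
    simp [hk, chunksOk, show (k+1) % 4 = 1 from by omega]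
  | [a, b, c] =>
    rw [chunksOk_cons]
    simp only [gridLoopA, inx_alpha_eq]
    simp [hk, chunksOk, show (k+1) % 4 = 1 from by omega,
          show (k+1+1) % 4 = 2 from by omega]
    cases PySem.Chars.isalpha a <;> cases PySem.Chars.isalpha b <;>
      cases PySem.Chars.isalpha c <;> simp
  | a :: b :: c :: d :: rest =>
    have ih := gridLoopA_eq_chunksOk (k + 4) rest (by omega)
    rw [chunksOk_cons]
    simp only [gridLoopA, inx_alpha_eq]
    simp [hk, ih, show (k+1) % 4 = 1 from by omega,
          show (k+1+1) % 4 = 2 from by omega, show (k+1+1+1) % 4 = 3 from by omega]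
    cases PySem.Chars.isalpha a <;> cases PySem.Chars.isalpha b <;>
      cases PySem.Chars.isalpha c <;> cases PySem.Chars.isalpha d <;> simp
termination_by xs.length

-- ===== VERDICT (by name: the statement is the Claim_ definition above) =====
theorem grid_valid_py_spec : Claim_equal_grid_valid_py := by
  intro grid _
  unfold Spec_grid_valid_py grid_valid_py grid_valid_py_alt
  simp [gridLoopA_eq_chunksOk 0 grid.toList rfl, Bool.and_assoc]
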